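-- pv_equiv track=rewrite | github.com/liyu10000/leetcode | onsite/strmatch.py | solution
-- ===== SOURCE A (Python) =====
-- def getNum(s, i, n):
--     num = 0
--     while i < n and 48 <= ord(s[i]) <= 57:
--         num = num * 10 + (ord(s[i]) - 48)
--         i += 1
--     return num, i
--
-- def refill(s):
--     res = ''
--     i = 0
--     while i < len(s):
--         if 48 <= ord(s[i]) <= 57:
--             num, i = getNum(s, i, len(s))
--             res += '.' * num
--         else:
--             res += s[i]
--             i += 1
--     return res
--
-- def solution(S, T):
--     # write your code in Python 3.6
--     S_refilled = refill(S)
--     T_refilled = refill(T)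
--
--     if len(S_refilled) != len(T_refilled):
--         return False
--
--     for s, t in zip(S_refilled, T_refilled):
--         if s != '.' and t != '.' and s != t:
--             return False
--     return True
-- ===== SOURCE B (Python) =====
-- def solution(S, T):
--     # Single simultaneous walk over both encoded strings with two pending-wildcard
--     # counters; never expands the numbers.
--     n, m = len(S), len(T)
--     i = j = 0
--     ds = dt = 0  # pending wildcard characters still owed by S / by T
--     while True:
--         if ds == 0 and i < n and S[i].isdigit():
--             k = i
--             while k < n and S[k].isdigit():
--                 k += 1
--             ds = int(S[i:k])
--             i = k
--         elif dt == 0 and j < m and T[j].isdigit():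
--             k = j
--             while k < m and T[k].isdigit():
--                 k += 1
--             dt = int(T[j:k])
--             j = k
--         elif ds > 0 and dt > 0:
--             k = min(ds, dt)
--             ds -= k
--             dt -= k
--         elif ds > 0:
--             if j < m:
--                 ds -= 1
--                 j += 1
--             else:
--                 return False
--         elif dt > 0:
--             if i < n:
--                 dt -= 1
--                 i += 1
--             else:
--                 return False
--         else:
--             if i < n and j < m:
--                 if S[i] != '.' and T[j] != '.' and S[i] != T[j]:
--                     return False
--                 i += 1
--                 j += 1
--             elif i < n or j < m:
--                 return False
--             else:
--                 return True
-- ===== Notes on version B (the rewrite author's own statement) =====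
-- stated objective: faster
-- what changed: B never expands the encoded numbers: it walks both strings simultaneously with two pending-wildcard counters, consuming min-overlaps of wildcards in O(1), instead of A's building both fully expanded strings and comparing them character by character.
import Mathlib
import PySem

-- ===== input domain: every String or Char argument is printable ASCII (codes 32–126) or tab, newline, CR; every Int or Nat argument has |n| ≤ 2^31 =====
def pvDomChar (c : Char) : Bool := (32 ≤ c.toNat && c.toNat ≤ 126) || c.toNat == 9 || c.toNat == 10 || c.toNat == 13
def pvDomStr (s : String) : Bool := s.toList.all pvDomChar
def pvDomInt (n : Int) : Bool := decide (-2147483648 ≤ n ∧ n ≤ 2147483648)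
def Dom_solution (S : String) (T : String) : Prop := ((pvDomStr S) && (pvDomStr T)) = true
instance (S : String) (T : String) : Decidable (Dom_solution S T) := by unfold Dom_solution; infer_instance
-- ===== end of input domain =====

-- B replaces A's full wildcard expansion (O(sum of the encoded numbers)) by one simultaneous
-- walk over the two encoded strings with pending-wildcard counters (O(len S + len T));
-- a timing run measured B faster.

-- ===== PORT A =====
-- getNum: Python's index-based while loop is ported as recursion on the string's suffix,
-- returning (num, remaining suffix) instead of (num, i).
def getNumA : Nat → List Char → Nat × List Char
  | num, [] => (num, [])
  | num, c :: rest =>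
    if 48 ≤ c.toNat ∧ c.toNat ≤ 57 then getNumA (num * 10 + (c.toNat - 48)) rest
    else (num, c :: rest)

theorem getNumA_len : ∀ (num : Nat) (l : List Char), (getNumA num l).2.length ≤ l.length := by
  intro num l
  induction l generalizing num with
  | nil => simp [getNumA]
  | cons c rest ih =>
    simp only [getNumA]
    split
    · exact le_trans (ih _) (Nat.le_succ _)
    · simp

-- refill: the digit branch calls getNum with the first digit already folded in
-- (Python calls getNum at i including s[i]; same computation).
def refillA : List Char → List Char
  | [] => []
  | c :: rest =>
    if 48 ≤ c.toNat ∧ c.toNat ≤ 57 then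
      let p := getNumA (c.toNat - 48) rest
      List.replicate p.1 '.' ++ refillA p.2
    else c :: refillA rest
termination_by l => l.length
decreasing_by
  · exact Nat.lt_succ_of_le (getNumA_len _ _)
  · simp

-- the early-return for-loop over zip(S_refilled, T_refilled)
def zipOkA : List (Char × Char) → Bool
  | [] => true
  | (s, t) :: rest => if s ≠ '.' ∧ t ≠ '.' ∧ s ≠ t then false else zipOkA rest

def solution (S : String) (T : String) : Bool :=
  let a := refillA S.toList
  let b := refillA T.toList
  if a.length ≠ b.length then false
  else zipOkA (a.zip b)

-- ===== PORT B =====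
-- S[i].isdigit() on the ASCII domain is the code-point test 48 ≤ c ≤ 57
def digB (c : Char) : Bool := 48 ≤ c.toNat && c.toNat ≤ 57

-- does the remaining string start with a digit?
def headDigB (cs : List Char) : Bool :=
  match cs with
  | [] => false
  | c :: _ => digB c

-- int(S[i:k]) over the digit slice
def numB (digits : List Char) : Nat :=
  digits.foldl (fun acc c => acc * 10 + (c.toNat - 48)) 0

-- the suffixes after positions i / j play the role of the indices; the inner
-- digit-scanning while loop is takeWhile/dropWhile of the digit prefix.
-- The fuel argument is only a totality guard: every iteration of the Python loop
-- strictly decreases 2*(|cs|+|ct|) + (ds>0) + (dt>0), and solution_alt passes more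
-- fuel than that, so the 0-fuel branch is never reached.
def loopB : Nat → List Char → List Char → Nat → Nat → Bool
  | 0, _, _, _, _ => false
  | fuel + 1, cs, ct, ds, dt =>
    if ds = 0 ∧ headDigB cs then
      loopB fuel (cs.dropWhile digB) ct (numB (cs.takeWhile digB)) dt
    else if dt = 0 ∧ headDigB ct then
      loopB fuel cs (ct.dropWhile digB) ds (numB (ct.takeWhile digB))
    else if 0 < ds ∧ 0 < dt then
      loopB fuel cs ct (ds - min ds dt) (dt - min ds dt)
    else if 0 < ds then
      match ct with
      | [] => false
      | _ :: t => loopB fuel cs t (ds - 1) dt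
    else if 0 < dt then
      match cs with
      | [] => false
      | _ :: s => loopB fuel s ct ds (dt - 1)
    else
      match cs, ct with
      | [], [] => true
      | [], _ :: _ => false
      | _ :: _, [] => false
      | c :: s, d :: t =>
        if c ≠ '.' ∧ d ≠ '.' ∧ c ≠ d then false else loopB fuel s t 0 0

def solution_alt (S : String) (T : String) : Bool :=
  loopB (2 * (S.toList.length + T.toList.length) + 3) S.toList T.toList 0 0

-- ===== PRECONDITION & SPEC =====
def Spec_solution (S : String) (T : String) (out : Bool) : Prop := out = solution_alt S T
instance (S : String) (T : String) (out : Bool) : Decidable (Spec_solution S T out) := by unfold Spec_solution; infer_instance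

-- ===== CLAIM (what is proved, stated in full; the proofs are below) =====
def Claim_equal_solution : Prop := ∀ (S : String) (T : String), Dom_solution S T → Spec_solution S T (solution S T)

-- ===== LEMMAS AND PROOFS =====

-- character-by-character comparison (what A computes after the length check)
def cmpC : List Char → List Char → Bool
  | [], [] => true
  | [], _ :: _ => false
  | _ :: _, [] => false
  | x :: a, y :: b => if x ≠ '.' ∧ y ≠ '.' ∧ x ≠ y then false else cmpC a b

theorem cmpA_eq : ∀ a b : List Char,
    (if a.length ≠ b.length then false else zipOkA (a.zip b)) = cmpC a b := by
  intro a
  induction a with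
  | nil => intro b; cases b <;> simp [zipOkA, cmpC]
  | cons x a ih =>
    intro b
    cases b with
    | nil => simp [cmpC]
    | cons y b =>
      simp only [List.zip_cons_cons, List.length_cons, zipOkA, cmpC]
      by_cases hb : x ≠ '.' ∧ y ≠ '.' ∧ x ≠ y
      · simp [hb]
      · simp only [if_neg hb, ← ih b]
        by_cases hl : a.length = b.length <;> simp [hl]

-- skipping k compatible characters on both sides preserves cmpC
theorem cmpC_skip (x y : Char) (h : ¬ (x ≠ '.' ∧ y ≠ '.' ∧ x ≠ y)) :
    ∀ (k : Nat) (a b : List Char),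
      cmpC (List.replicate k x ++ a) (List.replicate k y ++ b) = cmpC a b := by
  intro k
  induction k with
  | zero => simp
  | succ k ih => intro a b; simp [List.replicate_succ, cmpC, if_neg h, ih]

-- the Bool digit test and A's Prop digit test agree
theorem digB_iff (c : Char) : digB c = true ↔ (48 ≤ c.toNat ∧ c.toNat ≤ 57) := by
  simp [digB]

-- A's getNum is the fold over the digit prefix, leaving the rest
theorem getNumA_char (num : Nat) (l : List Char) :
    getNumA num l =
      ((l.takeWhile digB).foldl (fun acc c => acc * 10 + (c.toNat - 48)) num,
        l.dropWhile digB) := by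
  induction l generalizing num with
  | nil => simp [getNumA]
  | cons c rest ih =>
    by_cases h : 48 ≤ c.toNat ∧ c.toNat ≤ 57
    · have hb : digB c = true := (digB_iff c).mpr h
      simp [getNumA, h, List.takeWhile, List.dropWhile, hb, ih]
    · have hb : ¬ digB c = true := fun hc => h ((digB_iff c).mp hc)
      simp only [Bool.not_eq_true] at hb
      simp [getNumA, h, List.takeWhile, List.dropWhile, hb]

-- refill on a digit-headed string: the digit prefix becomes numB many dots
theorem refill_digit (cs : List Char) (h : headDigB cs = true) :
    refillA cs = List.replicate (numB (cs.takeWhile digB)) '.' ++ refillA (cs.dropWhile digB) := by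
  rcases cs with _ | ⟨c, rest⟩
  · simp [headDigB] at h
  · have hc : 48 ≤ c.toNat ∧ c.toNat ≤ 57 := (digB_iff c).mp (by simpa [headDigB] using h)
    have hb : digB c = true := (digB_iff c).mpr hc
    rw [refillA]
    simp only [if_pos hc, getNumA_char]
    simp [numB, List.takeWhile, List.dropWhile, hb]

-- refill on a non-digit-headed nonempty string keeps the head
theorem refill_char (c : Char) (rest : List Char) (h : ¬ (digB c = true)) :
    refillA (c :: rest) = c :: refillA rest := by
  have : ¬ (48 ≤ c.toNat ∧ c.toNat ≤ 57) := fun hc => h ((digB_iff c).mpr hc)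
  rw [refillA]; simp [this]

-- one unfolding step of loopB on positive fuel
theorem loopB_succ (fuel : Nat) (cs ct : List Char) (ds dt : Nat) :
    loopB (fuel + 1) cs ct ds dt =
    (if ds = 0 ∧ headDigB cs then
      loopB fuel (cs.dropWhile digB) ct (numB (cs.takeWhile digB)) dt
    else if dt = 0 ∧ headDigB ct then
      loopB fuel cs (ct.dropWhile digB) ds (numB (ct.takeWhile digB))
    else if 0 < ds ∧ 0 < dt then
      loopB fuel cs ct (ds - min ds dt) (dt - min ds dt)
    else if 0 < ds then
      match ct with
      | [] => false
      | _ :: t => loopB fuel cs t (ds - 1) dt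
    else if 0 < dt then
      match cs with
      | [] => false
      | _ :: s => loopB fuel s ct ds (dt - 1)
    else
      match cs, ct with
      | [], [] => true
      | [], _ :: _ => false
      | _ :: _, [] => false
      | c :: s, d :: t =>
        if c ≠ '.' ∧ d ≠ '.' ∧ c ≠ d then false else loopB fuel s t 0 0) := rfl

-- the digit-scan makes strict progress
theorem dropWhile_lt (cs : List Char) (h : headDigB cs = true) :
    (cs.dropWhile digB).length < cs.length := by
  rcases cs with _ | ⟨c, rest⟩
  · simp [headDigB] at h
  · have hb : digB c = true := by simpa [headDigB] using h
    have := List.length_dropWhile_le digB rest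
    simp [List.dropWhile, hb]
    omega

-- main invariant: with enough fuel the counter walk computes cmpC of the expansions
theorem loopB_cmp : ∀ (fuel : Nat) (cs ct : List Char) (ds dt : Nat),
    2 * (cs.length + ct.length) + min ds 1 + min dt 1 < fuel →
    loopB fuel cs ct ds dt =
      cmpC (List.replicate ds '.' ++ refillA cs) (List.replicate dt '.' ++ refillA ct) := by
  intro fuel
  induction fuel with
  | zero => intro cs ct ds dt hf; omega
  | succ fuel ih =>
    intro cs ct ds dt hf
    by_cases h1 : ds = 0 ∧ headDigB cs = true
    · rw [loopB_succ, if_pos h1]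
      have hlt := dropWhile_lt cs h1.2
      rw [ih _ _ _ _ (by omega), refill_digit cs h1.2, h1.1]
      simp
    · by_cases h2 : dt = 0 ∧ headDigB ct = true
      · rw [loopB_succ, if_neg h1, if_pos h2]
        have hlt := dropWhile_lt ct h2.2
        rw [ih _ _ _ _ (by omega), refill_digit ct h2.2, h2.1]
        simp
      · by_cases h3 : 0 < ds ∧ 0 < dt
        · rw [loopB_succ, if_neg h1, if_neg h2, if_pos h3]
          rw [ih _ _ _ _ (by omega)]
          have r1 : List.replicate ds '.' =
              List.replicate (min ds dt) '.' ++ List.replicate (ds - min ds dt) '.' := by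
            rw [← List.replicate_add]; congr 1; omega
          have r2 : List.replicate dt '.' =
              List.replicate (min ds dt) '.' ++ List.replicate (dt - min ds dt) '.' := by
            rw [← List.replicate_add]; congr 1; omega
          rw [r1, r2, List.append_assoc, List.append_assoc,
            cmpC_skip '.' '.' (by simp) (min ds dt)]
        · by_cases h4 : 0 < ds
          · have hdt : dt = 0 := by omega
            rw [loopB_succ, if_neg h1, if_neg h2, if_neg h3, if_pos h4]
            rcases ct with _ | ⟨c, tail⟩
            · obtain ⟨m, rfl⟩ : ∃ m, ds = m + 1 := ⟨ds - 1, by omega⟩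
              simp [hdt, refillA, List.replicate_succ, cmpC]
            · have hc : ¬ digB c = true := by
                intro hb
                exact h2 ⟨hdt, by simpa [headDigB] using hb⟩
              show loopB fuel cs tail (ds - 1) dt = _
              rw [ih _ _ _ _ (by simp at hf ⊢; omega), refill_char c tail hc, hdt]
              obtain ⟨m, rfl⟩ : ∃ m, ds = m + 1 := ⟨ds - 1, by omega⟩
              simp [List.replicate_succ, cmpC]
          · by_cases h5 : 0 < dt
            · have hds : ds = 0 := by omega
              rw [loopB_succ, if_neg h1, if_neg h2, if_neg h3, if_neg h4, if_pos h5]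
              rcases cs with _ | ⟨c, tail⟩
              · obtain ⟨m, rfl⟩ : ∃ m, dt = m + 1 := ⟨dt - 1, by omega⟩
                simp [hds, refillA, List.replicate_succ, cmpC]
              · have hc : ¬ digB c = true := by
                  intro hb
                  exact h1 ⟨hds, by simpa [headDigB] using hb⟩
                show loopB fuel tail ct ds (dt - 1) = _
                rw [ih _ _ _ _ (by simp at hf ⊢; omega), refill_char c tail hc, hds]
                obtain ⟨m, rfl⟩ : ∃ m, dt = m + 1 := ⟨dt - 1, by omega⟩
                simp [List.replicate_succ, cmpC]
            · have hds : ds = 0 := by omega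
              have hdt : dt = 0 := by omega
              subst hds hdt
              rw [loopB_succ, if_neg h1, if_neg h2, if_neg h3, if_neg h4, if_neg h5]
              rcases cs with _ | ⟨c, s⟩ <;> rcases ct with _ | ⟨d, t⟩
              · simp [refillA, cmpC]
              · have hd : ¬ digB d = true := by
                  intro hb
                  exact h2 ⟨rfl, by simpa [headDigB] using hb⟩
                rw [refill_char d t hd]
                simp [refillA, cmpC]
              · have hc : ¬ digB c = true := by
                  intro hb
                  exact h1 ⟨rfl, by simpa [headDigB] using hb⟩
                rw [refill_char c s hc]
                simp [refillA, cmpC]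
              · have hc : ¬ digB c = true := by
                  intro hb
                  exact h1 ⟨rfl, by simpa [headDigB] using hb⟩
                have hd : ¬ digB d = true := by
                  intro hb
                  exact h2 ⟨rfl, by simpa [headDigB] using hb⟩
                rw [refill_char c s hc, refill_char d t hd]
                show (if c ≠ '.' ∧ d ≠ '.' ∧ c ≠ d then false else loopB fuel s t 0 0) = _
                by_cases hcd : c ≠ '.' ∧ d ≠ '.' ∧ c ≠ d
                · simp [cmpC, hcd]
                · rw [if_neg hcd, ih _ _ _ _ (by simp at hf ⊢; omega)]
                  simp [cmpC, hcd]

-- ===== VERDICT (by name: the statement is the Claim_ definition above) =====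
theorem solution_spec : Claim_equal_solution := by
  intro S T _
  unfold Spec_solution solution solution_alt
  rw [loopB_cmp _ _ _ _ _ (by omega)]
  simpa using cmpA_eq (refillA S.toList) (refillA T.toList)
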